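-- pv_equiv track=rewrite | github.com/provide-io/wrknv | mutants/src/wrknv/wenv/operations/verify.py | x_parse_tofu_version__mutmut_5
-- ===== SOURCE A (Python) =====
-- def x_parse_tofu_version__mutmut_5(output: str) -> dict[str, str]:
--     """Parse OpenTofu version output."""
--
--     # Example: "OpenTofu v1.6.0"
--     lines = output.split("\n")
--
--     info = {"XXtoolXX": "tofu"}
--
--     for line in lines:
--         line = line.strip()
--         if line.startswith("OpenTofu v"):
--             version = line.replace("OpenTofu v", "")
--             info["version"] = version
--         elif line.startswith("on "):
--             # Extract platform from "on darwin_arm64" format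
--             info["platform"] = line.replace("on ", "").strip()
--
--     return info
-- ===== SOURCE B (Python) =====
-- def x_parse_tofu_version__mutmut_5(output: str) -> dict[str, str]:
--     """Parse OpenTofu version output via filtered passes (last match wins)."""
--     stripped = [line.strip() for line in output.split("\n")]
--
--     info = {"XXtoolXX": "tofu"}
--
--     versions = [l.replace("OpenTofu v", "") for l in stripped if l.startswith("OpenTofu v")]
--     if versions:
--         info["version"] = versions[-1]
--
--     platforms = [l.replace("on ", "").strip() for l in stripped if l.startswith("on ")]
--     if platforms:
--         info["platform"] = platforms[-1]
--
--     return info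
-- ===== Notes on version B (the rewrite author's own statement) =====
-- stated objective: alternative
-- what changed: Replaces A's single stateful dict-update loop with two filtered passes taking the last version/platform match; Pre_ excludes inputs where a platform line precedes the first version line while both kinds are present, on which A's dict key order is accidental dict-insertion order.
import Mathlib
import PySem

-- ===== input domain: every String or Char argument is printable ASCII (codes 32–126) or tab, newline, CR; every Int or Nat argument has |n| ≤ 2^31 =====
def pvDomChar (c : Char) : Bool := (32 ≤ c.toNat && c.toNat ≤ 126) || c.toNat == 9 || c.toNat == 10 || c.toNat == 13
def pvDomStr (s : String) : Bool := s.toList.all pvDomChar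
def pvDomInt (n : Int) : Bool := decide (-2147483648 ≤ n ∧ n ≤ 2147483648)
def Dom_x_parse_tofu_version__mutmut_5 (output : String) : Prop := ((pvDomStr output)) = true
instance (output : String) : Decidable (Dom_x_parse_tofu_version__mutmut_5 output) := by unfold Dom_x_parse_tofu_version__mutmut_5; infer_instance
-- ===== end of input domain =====

-- B parses by two filtered passes (last match wins) instead of A's single stateful
-- dict-update loop; objective: alternative decomposition, same O(n) cost.

-- ===== PORT A =====
def x_parse_tofu_version__mutmut_5 (output : String) : List (String × String) :=
  -- lines = output.split("\n"); sep is the nonempty literal "\n", so split? is always `some`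
  let lines := (PySem.Str.split? output "\n").getD []
  let info : PySem.Dict String String := PySem.Dict.ofList [("XXtoolXX", "tofu")]
  let info := lines.foldl (fun info line =>
    let line := PySem.Str.strip line
    if PySem.Str.startswith line "OpenTofu v" then
      PySem.Dict.insert info "version" (PySem.Str.replace line "OpenTofu v" "")
    else if PySem.Str.startswith line "on " then
      PySem.Dict.insert info "platform" (PySem.Str.strip (PySem.Str.replace line "on " ""))
    else info) info
  info.items

-- ===== PORT B =====
def x_parse_tofu_version__mutmut_5_alt (output : String) : List (String × String) :=
  let stripped := ((PySem.Str.split? output "\n").getD []).map PySem.Str.strip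
  let info : PySem.Dict String String := PySem.Dict.ofList [("XXtoolXX", "tofu")]
  let versions := (stripped.filter (fun l => PySem.Str.startswith l "OpenTofu v")).map
      (fun l => PySem.Str.replace l "OpenTofu v" "")
  -- versions[-1] is only taken on a nonempty list, so the pyGetD default is unreachable
  let info := if versions ≠ [] then
      PySem.Dict.insert info "version" (PySem.List.pyGetD versions (-1) "") else info
  let platforms := (stripped.filter (fun l => PySem.Str.startswith l "on ")).map
      (fun l => PySem.Str.strip (PySem.Str.replace l "on " ""))
  let info := if platforms ≠ [] then
      PySem.Dict.insert info "platform" (PySem.List.pyGetD platforms (-1) "") else info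
  info.items

-- ===== PRECONDITION & SPEC =====
def pvIsV (l : String) : Bool := PySem.Str.startswith l "OpenTofu v"
def pvIsP (l : String) : Bool := PySem.Str.startswith l "on "

-- Pre_ excludes inputs where a platform ("on ") line precedes the first version line while
-- both kinds are present: there A's dict key order (platform before version) is an accident
-- of dict-insertion order, and B's version-first order is equally defensible.
def Pre_x_parse_tofu_version__mutmut_5 (output : String) : Prop :=
  let ls := ((PySem.Str.split? output "\n").getD []).map PySem.Str.strip
  ls.any pvIsV = true → pvIsP ((ls.find? (fun l => pvIsV l || pvIsP l)).getD "") = false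
instance (output : String) : Decidable (Pre_x_parse_tofu_version__mutmut_5 output) := by unfold Pre_x_parse_tofu_version__mutmut_5; infer_instance

def pvWitness_x_parse_tofu_version__mutmut_5 : String := "OpenTofu v1.6.0\non darwin_arm64"

def Spec_x_parse_tofu_version__mutmut_5 (output : String) (out : List (String × String)) : Prop := out = x_parse_tofu_version__mutmut_5_alt output
instance (output : String) (out : List (String × String)) : Decidable (Spec_x_parse_tofu_version__mutmut_5 output out) := by unfold Spec_x_parse_tofu_version__mutmut_5; infer_instance

-- ===== CLAIM (what is proved, stated in full; the proofs are below) =====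
def Claim_equal_x_parse_tofu_version__mutmut_5 : Prop := ∀ (output : String), Dom_x_parse_tofu_version__mutmut_5 output → Pre_x_parse_tofu_version__mutmut_5 output → Spec_x_parse_tofu_version__mutmut_5 output (x_parse_tofu_version__mutmut_5 output)

-- ===== LEMMAS AND PROOFS =====

def pvFV (l : String) : String := PySem.Str.replace l "OpenTofu v" ""
def pvFP (l : String) : String := PySem.Str.strip (PySem.Str.replace l "on " "")

def pvStep (info : PySem.Dict String String) (line : String) : PySem.Dict String String :=
  if pvIsV line then PySem.Dict.insert info "version" (pvFV line)
  else if pvIsP line then PySem.Dict.insert info "platform" (pvFP line)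
  else info

def pvVs (ls : List String) : List String := (ls.filter pvIsV).map pvFV
def pvPs (ls : List String) : List String := (ls.filter pvIsP).map pvFP

def pvPairs (ls : List String) : List (String × String) :=
  (if pvVs ls ≠ [] then [("version", PySem.List.pyGetD (pvVs ls) (-1) "")] else []) ++
  (if pvPs ls ≠ [] then [("platform", PySem.List.pyGetD (pvPs ls) (-1) "")] else [])

-- a line cannot start with both "OpenTofu v" and "on "
theorem pvDisj (l : String) (h : pvIsV l = true) : pvIsP l = false := by
  by_contra hp
  simp only [Bool.not_eq_false] at hp
  simp only [pvIsV, pvIsP, PySem.Str.startswith_eq, PySem.Chars.startswith_iff] at h hp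
  have := List.prefix_of_prefix_length_le hp h (by decide)
  revert this; decide

theorem pvVs_cons_pos (l : String) (ls : List String) (h : pvIsV l = true) :
    pvVs (l :: ls) = pvFV l :: pvVs ls := by simp [pvVs, h]
theorem pvVs_cons_neg (l : String) (ls : List String) (h : pvIsV l = false) :
    pvVs (l :: ls) = pvVs ls := by simp [pvVs, h]
theorem pvPs_cons_pos (l : String) (ls : List String) (h : pvIsP l = true) :
    pvPs (l :: ls) = pvFP l :: pvPs ls := by simp [pvPs, h]
theorem pvPs_cons_neg (l : String) (ls : List String) (h : pvIsP l = false) :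
    pvPs (l :: ls) = pvPs ls := by simp [pvPs, h]

-- a nonempty list's last element via Python's xs[-1]
theorem pvLast_cons (x : String) (xs : List String) :
    PySem.List.pyGetD (x :: xs) (-1) "" = xs.getLastD x := by
  rw [PySem.List.pyGetD_neg_one (x :: xs) "" (by simp), List.getLast_eq_getLastD]

theorem pvLast_ne (xs : List String) (h : xs ≠ []) :
    PySem.List.pyGetD xs (-1) "" = xs.getLastD "" := by
  obtain ⟨a, as, rfl⟩ := List.exists_cons_of_ne_nil h
  rw [pvLast_cons, List.getLastD_cons]

theorem pvL2 (ls : List String) (x y : String) :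
    ls.foldl pvStep (PySem.Dict.mk [("XXtoolXX", "tofu"), ("version", x), ("platform", y)]) =
      PySem.Dict.mk [("XXtoolXX", "tofu"), ("version", (pvVs ls).getLastD x),
        ("platform", (pvPs ls).getLastD y)] := by
  induction ls generalizing x y with
  | nil => simp [pvVs, pvPs]
  | cons l ls ih =>
    by_cases hv : pvIsV l = true
    · have hp := pvDisj l hv
      have hstep : pvStep (PySem.Dict.mk [("XXtoolXX", "tofu"), ("version", x), ("platform", y)]) l
          = PySem.Dict.mk [("XXtoolXX", "tofu"), ("version", pvFV l), ("platform", y)] := by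
        simp [pvStep, hv, PySem.Dict.insert]
      rw [List.foldl_cons, hstep, ih, pvVs_cons_pos l ls hv, pvPs_cons_neg l ls hp,
        List.getLastD_cons]
    · have hv' : pvIsV l = false := by rwa [Bool.not_eq_true] at hv
      by_cases hp : pvIsP l = true
      · have hstep : pvStep (PySem.Dict.mk [("XXtoolXX", "tofu"), ("version", x), ("platform", y)]) l
            = PySem.Dict.mk [("XXtoolXX", "tofu"), ("version", x), ("platform", pvFP l)] := by
          simp [pvStep, hv', hp, PySem.Dict.insert]
        rw [List.foldl_cons, hstep, ih, pvVs_cons_neg l ls hv', pvPs_cons_pos l ls hp,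
          List.getLastD_cons]
      · have hp' : pvIsP l = false := by rwa [Bool.not_eq_true] at hp
        have hstep : pvStep (PySem.Dict.mk [("XXtoolXX", "tofu"), ("version", x), ("platform", y)]) l
            = PySem.Dict.mk [("XXtoolXX", "tofu"), ("version", x), ("platform", y)] := by
          simp [pvStep, hv', hp']
        rw [List.foldl_cons, hstep, ih, pvVs_cons_neg l ls hv', pvPs_cons_neg l ls hp']

theorem pvL1v (ls : List String) (x : String) :
    ls.foldl pvStep (PySem.Dict.mk [("XXtoolXX", "tofu"), ("version", x)]) =
      PySem.Dict.mk ([("XXtoolXX", "tofu"), ("version", (pvVs ls).getLastD x)] ++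
        (if pvPs ls = [] then [] else [("platform", (pvPs ls).getLastD "")])) := by
  induction ls generalizing x with
  | nil => simp [pvVs, pvPs]
  | cons l ls ih =>
    by_cases hv : pvIsV l = true
    · have hp := pvDisj l hv
      have hstep : pvStep (PySem.Dict.mk [("XXtoolXX", "tofu"), ("version", x)]) l
          = PySem.Dict.mk [("XXtoolXX", "tofu"), ("version", pvFV l)] := by
        simp [pvStep, hv, PySem.Dict.insert]
      rw [List.foldl_cons, hstep, ih, pvVs_cons_pos l ls hv, pvPs_cons_neg l ls hp,
        List.getLastD_cons]
    · have hv' : pvIsV l = false := by rwa [Bool.not_eq_true] at hv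
      by_cases hp : pvIsP l = true
      · have hstep : pvStep (PySem.Dict.mk [("XXtoolXX", "tofu"), ("version", x)]) l
            = PySem.Dict.mk [("XXtoolXX", "tofu"), ("version", x), ("platform", pvFP l)] := by
          simp [pvStep, hv', hp, PySem.Dict.insert]
        rw [List.foldl_cons, hstep, pvL2 ls x (pvFP l), pvVs_cons_neg l ls hv',
          pvPs_cons_pos l ls hp, List.getLastD_cons, if_neg (by simp)]
        rfl
      · have hp' : pvIsP l = false := by rwa [Bool.not_eq_true] at hp
        have hstep : pvStep (PySem.Dict.mk [("XXtoolXX", "tofu"), ("version", x)]) l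
            = PySem.Dict.mk [("XXtoolXX", "tofu"), ("version", x)] := by
          simp [pvStep, hv', hp']
        rw [List.foldl_cons, hstep, ih, pvVs_cons_neg l ls hv', pvPs_cons_neg l ls hp']

theorem pvL1p (ls : List String) : ∀ (y : String), ls.any pvIsV = false →
    ls.foldl pvStep (PySem.Dict.mk [("XXtoolXX", "tofu"), ("platform", y)]) =
      PySem.Dict.mk [("XXtoolXX", "tofu"), ("platform", (pvPs ls).getLastD y)] := by
  induction ls with
  | nil => intro y _; simp [pvPs]
  | cons l ls ih =>
    intro y hnv
    simp only [List.any_cons, Bool.or_eq_false_iff] at hnv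
    obtain ⟨hv', hnv⟩ := hnv
    by_cases hp : pvIsP l = true
    · have hstep : pvStep (PySem.Dict.mk [("XXtoolXX", "tofu"), ("platform", y)]) l
          = PySem.Dict.mk [("XXtoolXX", "tofu"), ("platform", pvFP l)] := by
        simp [pvStep, hv', hp, PySem.Dict.insert]
      rw [List.foldl_cons, hstep, ih _ hnv, pvPs_cons_pos l ls hp, List.getLastD_cons]
    · have hp' : pvIsP l = false := by rwa [Bool.not_eq_true] at hp
      have hstep : pvStep (PySem.Dict.mk [("XXtoolXX", "tofu"), ("platform", y)]) l
          = PySem.Dict.mk [("XXtoolXX", "tofu"), ("platform", y)] := by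
        simp [pvStep, hv', hp']
      rw [List.foldl_cons, hstep, ih _ hnv, pvPs_cons_neg l ls hp']

-- no version line at all ⇒ pvVs is empty
theorem pvVs_nil_of_no_any (ls : List String) (h : ls.any pvIsV = false) : pvVs ls = [] := by
  unfold pvVs
  rw [List.map_eq_nil_iff, List.filter_eq_nil_iff]
  intro a ha
  simp only [List.any_eq_false] at h
  simpa using h a ha

theorem pvMain (ls : List String)
    (hpre : ls.any pvIsV = true → pvIsP ((ls.find? (fun l => pvIsV l || pvIsP l)).getD "") = false) :
    ls.foldl pvStep (PySem.Dict.mk [("XXtoolXX", "tofu")]) =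
      PySem.Dict.mk (("XXtoolXX", "tofu") :: pvPairs ls) := by
  induction ls with
  | nil => simp [pvPairs, pvVs, pvPs]
  | cons l ls ih =>
    by_cases hv : pvIsV l = true
    · have hp := pvDisj l hv
      have hstep : pvStep (PySem.Dict.mk [("XXtoolXX", "tofu")]) l
          = PySem.Dict.mk [("XXtoolXX", "tofu"), ("version", pvFV l)] := by
        simp [pvStep, hv, PySem.Dict.insert]
      rw [List.foldl_cons, hstep, pvL1v ls (pvFV l)]
      by_cases hps : pvPs ls = []
      · simp [pvPairs, pvVs_cons_pos l ls hv, pvPs_cons_neg l ls hp, pvLast_cons, hps]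
      · simp [pvPairs, pvVs_cons_pos l ls hv, pvPs_cons_neg l ls hp, pvLast_cons, hps,
          pvLast_ne (pvPs ls) hps]
    · have hv' : pvIsV l = false := by rwa [Bool.not_eq_true] at hv
      by_cases hp : pvIsP l = true
      · -- first matching line is a platform line: by Pre_, no version line anywhere
        have hfind : ((l :: ls).find? (fun s => pvIsV s || pvIsP s)) = some l :=
          List.find?_cons_of_pos (by simp [hp])
        have hnv : (l :: ls).any pvIsV = false := by
          by_contra hvany
          simp only [Bool.not_eq_false] at hvany
          have := hpre hvany
          rw [hfind] at this
          simp [hp] at this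
        have hnv' : ls.any pvIsV = false := by
          simp only [List.any_cons, Bool.or_eq_false_iff] at hnv; exact hnv.2
        have hstep : pvStep (PySem.Dict.mk [("XXtoolXX", "tofu")]) l
            = PySem.Dict.mk [("XXtoolXX", "tofu"), ("platform", pvFP l)] := by
          simp [pvStep, hv', hp, PySem.Dict.insert]
        rw [List.foldl_cons, hstep, pvL1p ls (pvFP l) hnv']
        simp [pvPairs, pvVs_cons_neg l ls hv', pvVs_nil_of_no_any ls hnv',
          pvPs_cons_pos l ls hp, pvLast_cons]
      · have hp' : pvIsP l = false := by rwa [Bool.not_eq_true] at hp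
        have hstep : pvStep (PySem.Dict.mk [("XXtoolXX", "tofu")]) l
            = PySem.Dict.mk [("XXtoolXX", "tofu")] := by
          simp [pvStep, hv', hp']
        have hfind : List.find? (fun s => pvIsV s || pvIsP s) (l :: ls)
            = List.find? (fun s => pvIsV s || pvIsP s) ls :=
          List.find?_cons_of_neg (by simp [hv', hp'])
        have hpre' : ls.any pvIsV = true → pvIsP ((ls.find? (fun s => pvIsV s || pvIsP s)).getD "") = false := by
          intro hany
          have := hpre (by simp [hany])
          rwa [hfind] at this
        have hpairs : pvPairs (l :: ls) = pvPairs ls := by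
          simp [pvPairs, pvVs_cons_neg l ls hv', pvPs_cons_neg l ls hp']
        rw [List.foldl_cons, hstep, ih hpre', hpairs]

-- B's two conditional inserts produce exactly the base pair followed by pvPairs
theorem pvAltItems (ls : List String) :
    (let info : PySem.Dict String String := PySem.Dict.ofList [("XXtoolXX", "tofu")]
     let info := if pvVs ls ≠ [] then
        PySem.Dict.insert info "version" (PySem.List.pyGetD (pvVs ls) (-1) "") else info
     let info := if pvPs ls ≠ [] then
        PySem.Dict.insert info "platform" (PySem.List.pyGetD (pvPs ls) (-1) "") else info
     info.items) = ("XXtoolXX", "tofu") :: pvPairs ls := by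
  unfold pvPairs
  split_ifs <;> simp_all [PySem.Dict.ofList, PySem.Dict.empty, PySem.Dict.update, PySem.Dict.insert, PySem.Dict.contains]

-- ===== VERDICT (by name: the statement is the Claim_ definition above) =====
theorem x_parse_tofu_version__mutmut_5_spec : Claim_equal_x_parse_tofu_version__mutmut_5 := by
  intro output _ hpre
  unfold Pre_x_parse_tofu_version__mutmut_5 at hpre
  unfold Spec_x_parse_tofu_version__mutmut_5 x_parse_tofu_version__mutmut_5
    x_parse_tofu_version__mutmut_5_alt
  set lines := (PySem.Str.split? output "\n").getD [] with hl
  have hA : lines.foldl (fun info line =>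
      let line := PySem.Str.strip line
      if PySem.Str.startswith line "OpenTofu v" then
        PySem.Dict.insert info "version" (PySem.Str.replace line "OpenTofu v" "")
      else if PySem.Str.startswith line "on " then
        PySem.Dict.insert info "platform" (PySem.Str.strip (PySem.Str.replace line "on " ""))
      else info) (PySem.Dict.ofList [("XXtoolXX", "tofu")]) =
      (lines.map PySem.Str.strip).foldl pvStep (PySem.Dict.ofList [("XXtoolXX", "tofu")]) := by
    rw [List.foldl_map]
    rfl
  simp only [hA]
  have hofList : (PySem.Dict.ofList [("XXtoolXX", "tofu")] : PySem.Dict String String) =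
      PySem.Dict.mk [("XXtoolXX", "tofu")] := rfl
  rw [hofList, pvMain (lines.map PySem.Str.strip) hpre]
  exact (pvAltItems (lines.map PySem.Str.strip)).symm
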